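-- pv_equiv track=rewrite | github.com/SNNMAIRA/mist_train_girls | casino.py | execute_number
-- ===== SOURCE A (Python) =====
-- def execute_number(original_cardlist, max_number_digital):
--     dict1 = {0: '0', 1: '1', 2: '2', 3: '3', 4: '4', 5: '5', 6: '6', 7: '7', 8: '8', 9: '9', 10: 'X', 11: 'J', 12: 'Q', 13: 'K'}
--     dict2 = {'0': 0, '1': 0, '2': 0, '3': 0, '4': 0, '5': 0, '6': 0, '7': 0, '8': 0, '9': 0, 'X': 0, 'J': 0, 'Q': 0, 'K': 0}
--     change_list = []
--     for i in range(5):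
--         dict2[original_cardlist[i][1]] = dict2[original_cardlist[i][1]] + 1
--     for i in range(1, 14):
--         if(dict2[dict1[i]] < 2):
--             for j in range(5):
--                 if(dict1[i] == original_cardlist[j][1]):
--                     change_list.append(j)
--     return change_list
-- ===== SOURCE B (Python) =====
-- def execute_number(original_cardlist, max_number_digital):
--     groups = {v: [] for v in '123456789XJQK'}
--     for j in range(5):
--         v = original_cardlist[j][1]
--         if v != '0':
--             groups[v].append(j)
--     return [j for idxs in groups.values() for j in idxs if len(idxs) < 2]
-- ===== Notes on version B (the rewrite author's own statement) =====
-- stated objective: simpler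
-- what changed: A counts values in a dict and then rescans all five cards once per each of the 13 ranked values; B makes one grouping pass that appends each card index to a per-value bucket in a rank-ordered dict and then flattens the buckets holding fewer than two indices.
import Mathlib
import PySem

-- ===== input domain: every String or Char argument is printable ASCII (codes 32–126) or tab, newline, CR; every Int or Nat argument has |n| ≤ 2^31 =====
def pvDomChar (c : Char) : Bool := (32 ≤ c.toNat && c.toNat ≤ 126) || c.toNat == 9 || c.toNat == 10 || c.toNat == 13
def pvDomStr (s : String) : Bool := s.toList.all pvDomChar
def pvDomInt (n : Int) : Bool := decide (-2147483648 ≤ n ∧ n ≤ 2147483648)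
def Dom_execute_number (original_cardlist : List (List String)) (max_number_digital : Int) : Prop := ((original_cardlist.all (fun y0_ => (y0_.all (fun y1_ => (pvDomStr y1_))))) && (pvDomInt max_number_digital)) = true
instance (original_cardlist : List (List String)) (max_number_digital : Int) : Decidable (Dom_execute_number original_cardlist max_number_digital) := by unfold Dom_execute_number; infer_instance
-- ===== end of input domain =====

-- B replaces A's 13×5 value-by-value rescans over a counting dict by one grouping pass that buckets
-- card indices per value in a rank-ordered dict and flattens the buckets of size < 2 (objective: simpler).

set_option maxHeartbeats 1600000
set_option maxRecDepth 8192

-- ===== PORT A =====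
def execute_number (original_cardlist : List (List String)) (max_number_digital : Int) : List Int :=
  let dict1 : PySem.Dict Int String := PySem.Dict.ofList
    [(0,"0"),(1,"1"),(2,"2"),(3,"3"),(4,"4"),(5,"5"),(6,"6"),(7,"7"),(8,"8"),(9,"9"),(10,"X"),(11,"J"),(12,"Q"),(13,"K")]
  let dict2 : PySem.Dict String Int := PySem.Dict.ofList
    [("0",0),("1",0),("2",0),("3",0),("4",0),("5",0),("6",0),("7",0),("8",0),("9",0),("X",0),("J",0),("Q",0),("K",0)]
  -- for i in range(5): dict2[cardlist[i][1]] += 1  (inputs that would raise IndexError/KeyError lie outside Pre_)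
  let dict2 := (PySem.List.pyRange 0 5 1).foldl (fun d i =>
      let v := PySem.List.pyGetD (PySem.List.pyGetD original_cardlist i []) 1 ""
      d.insert v (d.getD v 0 + 1)) dict2
  -- for i in range(1, 14): if dict2[dict1[i]] < 2: for j in range(5): append matching j
  (PySem.List.pyRange 1 14 1).foldl (fun change_list i =>
      if dict2.getD (dict1.getD i "") 0 < 2 then
        (PySem.List.pyRange 0 5 1).foldl (fun acc j =>
          if dict1.getD i "" == PySem.List.pyGetD (PySem.List.pyGetD original_cardlist j []) 1 "" then acc ++ [j] else acc) change_list
      else change_list) []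

-- ===== PORT B =====
def execute_number_alt (original_cardlist : List (List String)) (max_number_digital : Int) : List Int :=
  -- groups = {v: [] for v in '123456789XJQK'}
  let groups : PySem.Dict String (List Int) :=
    (["1","2","3","4","5","6","7","8","9","X","J","Q","K"] : List String).foldl
      (fun d v => d.insert v []) PySem.Dict.empty
  -- for j in range(5): v = cardlist[j][1]; if v != '0': groups[v].append(j)
  let groups := (PySem.List.pyRange 0 5 1).foldl (fun d j =>
      let v := PySem.List.pyGetD (PySem.List.pyGetD original_cardlist j []) 1 ""
      if v != "0" then d.modify v [] (fun t => t ++ [j]) else d) groups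
  -- [j for idxs in groups.values() for j in idxs if len(idxs) < 2]
  groups.values.flatMap (fun idxs => idxs.filter (fun _ => decide (idxs.length < 2)))

-- ===== PRECONDITION & SPEC =====
def pvK14 : List String := ["0","1","2","3","4","5","6","7","8","9","X","J","Q","K"]

-- Pre_ excludes exactly the inputs on which A raises: fewer than 5 cards (IndexError), one of the
-- first five cards with no second entry (IndexError; then its pyGetD default "" is not in pvK14),
-- or a second entry that is not one of the 14 card-value strings (KeyError).
def Pre_execute_number (original_cardlist : List (List String)) (max_number_digital : Int) : Prop :=
  5 ≤ original_cardlist.length ∧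
  ∀ c ∈ original_cardlist.take 5, 2 ≤ c.length ∧ PySem.List.pyGetD c 1 "" ∈ pvK14
instance (original_cardlist : List (List String)) (max_number_digital : Int) : Decidable (Pre_execute_number original_cardlist max_number_digital) := by unfold Pre_execute_number; infer_instance

def pvWitness_execute_number : List (List String) × Int :=
  ([["a","1"],["b","1"],["c","3"],["d","X"],["e","K"]], 0)

def Spec_execute_number (original_cardlist : List (List String)) (max_number_digital : Int) (out : List Int) : Prop := out = execute_number_alt original_cardlist max_number_digital
instance (original_cardlist : List (List String)) (max_number_digital : Int) (out : List Int) : Decidable (Spec_execute_number original_cardlist max_number_digital out) := by unfold Spec_execute_number; infer_instance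

-- ===== CLAIM (what is proved, stated in full; the proofs are below) =====
def Claim_equal_execute_number : Prop := ∀ (original_cardlist : List (List String)) (max_number_digital : Int), Dom_execute_number original_cardlist max_number_digital → Pre_execute_number original_cardlist max_number_digital → Spec_execute_number original_cardlist max_number_digital (execute_number original_cardlist max_number_digital)

-- ===== LEMMAS AND PROOFS =====

-- the per-value index list both programs produce: indices among 0..4 whose value equals k
def pvIdx (k a0 a1 a2 a3 a4 : String) : List Int :=
  ((((if k == a0 then [(0:Int)] else []) ++ (if k == a1 then [1] else [])) ++ (if k == a2 then [2] else []))
    ++ (if k == a3 then [3] else [])) ++ (if k == a4 then [4] else [])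

-- A's unfolded inner append loop, factored through the accumulator
lemma inner5 (k a0 a1 a2 a3 a4 : String) (acc : List Int) :
  (if (k == a4) = true then
     (if (k == a3) = true then
        (if (k == a2) = true then
           (if (k == a1) = true then
              (if (k == a0) = true then acc ++ [(0:Int)] else acc) ++ [1]
            else (if (k == a0) = true then acc ++ [(0:Int)] else acc)) ++ [2]
         else (if (k == a1) = true then
              (if (k == a0) = true then acc ++ [(0:Int)] else acc) ++ [1]
            else (if (k == a0) = true then acc ++ [(0:Int)] else acc))) ++ [3]
      else (if (k == a2) = true then
           (if (k == a1) = true then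
              (if (k == a0) = true then acc ++ [(0:Int)] else acc) ++ [1]
            else (if (k == a0) = true then acc ++ [(0:Int)] else acc)) ++ [2]
         else (if (k == a1) = true then
              (if (k == a0) = true then acc ++ [(0:Int)] else acc) ++ [1]
            else (if (k == a0) = true then acc ++ [(0:Int)] else acc)))) ++ [4]
   else
     (if (k == a3) = true then
        (if (k == a2) = true then
           (if (k == a1) = true then
              (if (k == a0) = true then acc ++ [(0:Int)] else acc) ++ [1]
            else (if (k == a0) = true then acc ++ [(0:Int)] else acc)) ++ [2]
         else (if (k == a1) = true then
              (if (k == a0) = true then acc ++ [(0:Int)] else acc) ++ [1]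
            else (if (k == a0) = true then acc ++ [(0:Int)] else acc))) ++ [3]
      else (if (k == a2) = true then
           (if (k == a1) = true then
              (if (k == a0) = true then acc ++ [(0:Int)] else acc) ++ [1]
            else (if (k == a0) = true then acc ++ [(0:Int)] else acc)) ++ [2]
         else (if (k == a1) = true then
              (if (k == a0) = true then acc ++ [(0:Int)] else acc) ++ [1]
            else (if (k == a0) = true then acc ++ [(0:Int)] else acc)))))
  = acc ++ pvIdx k a0 a1 a2 a3 a4 := by
  unfold pvIdx
  split_ifs <;> simp

lemma ite_append_acc (P : Prop) [Decidable P] (acc X : List Int) :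
    (if P then acc ++ X else acc) = acc ++ (if P then X else []) := by
  split_ifs <;> simp

lemma getD_zero_of_all (d : PySem.Dict String Int) (h : ∀ p ∈ d.items, p.2 = 0) (k : String) :
    d.getD k 0 = 0 := by
  rw [PySem.Dict.getD_eq_get?_getD]
  cases hq : d.get? k with
  | none => rfl
  | some v => simpa using h _ (PySem.Dict.mem_items_of_get?_eq_some _ hq)

lemma hd0 (k : String) :
    (PySem.Dict.ofList [("0",(0:Int)),("1",0),("2",0),("3",0),("4",0),("5",0),("6",0),("7",0),("8",0),("9",0),("X",0),("J",0),("Q",0),("K",0)]).getD k 0 = 0 :=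
  getD_zero_of_all _ (by decide) k

-- B's grouping loop: the keys never change (every non-"0" value is already a key)
lemma gk_keys (vf : Int → String) (l : List Int) (d : PySem.Dict String (List Int))
    (h : ∀ j ∈ l, vf j = "0" ∨ d.contains (vf j) = true) :
    (List.foldl (fun (d : PySem.Dict String (List Int)) j =>
      if (vf j != "0") = true then d.modify (vf j) [] (fun t => t ++ [j]) else d) d l).keys = d.keys := by
  induction l generalizing d with
  | nil => rfl
  | cons j l ih =>
    simp only [List.foldl_cons]
    by_cases h0 : vf j = "0"
    · rw [show (if (vf j != "0") = true then d.modify (vf j) [] (fun t => t ++ [j]) else d) = d by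
        simp [h0]]
      exact ih d (fun j' hj' => h j' (List.mem_cons_of_mem _ hj'))
    · have hc : d.contains (vf j) = true := by
        rcases h j (List.mem_cons_self ..) with h' | h'
        · exact absurd h' h0
        · exact h'
      rw [show (if (vf j != "0") = true then d.modify (vf j) [] (fun t => t ++ [j]) else d)
            = d.modify (vf j) [] (fun t => t ++ [j]) by simp [h0]]
      rw [ih _ ?_]
      · rw [PySem.Dict.keys_modify, PySem.Dict.keys_insert_of_contains]
        exact hc
      · intro j' hj'
        rcases h j' (List.mem_cons_of_mem _ hj') with h' | h'
        · exact Or.inl h'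
        · refine Or.inr ?_
          rw [PySem.Dict.contains_modify]
          simp [h']

-- B's grouping loop: each non-"0" bucket collects, in order, the indices whose value is its key
lemma gk_getD (vf : Int → String) (l : List Int) (d : PySem.Dict String (List Int))
    (k : String) (hk : k ≠ "0") :
    (List.foldl (fun (d : PySem.Dict String (List Int)) j =>
      if (vf j != "0") = true then d.modify (vf j) [] (fun t => t ++ [j]) else d) d l).getD k []
    = d.getD k [] ++ (l.filter (fun j => k == vf j)).map (fun j => j) := by
  induction l generalizing d with
  | nil => simp
  | cons j l ih =>
    simp only [List.foldl_cons, List.filter_cons]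
    by_cases h0 : vf j = "0"
    · have hne : (k == vf j) = false := by simp [h0, hk]
      rw [show (if (vf j != "0") = true then d.modify (vf j) [] (fun t => t ++ [j]) else d) = d by
        simp [h0]]
      rw [hne, ih]
      simp
    · rw [show (if (vf j != "0") = true then d.modify (vf j) [] (fun t => t ++ [j]) else d)
            = d.modify (vf j) [] (fun t => t ++ [j]) by simp [h0]]
      rw [ih]
      by_cases he : k = vf j
      · rw [show (k == vf j) = true by simp [he]]
        subst he
        rw [PySem.Dict.getD_modify_self]
        simp
      · rw [show (k == vf j) = false by simp [he]]
        rw [PySem.Dict.getD_modify_of_ne]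
        · simp
        · exact he

lemma idx5 (vf : Int → String) (k : String) :
    (List.filter (fun j => k == vf j) ([0,1,2,3,4] : List Int)).map (fun j => j)
    = pvIdx k (vf 0) (vf 1) (vf 2) (vf 3) (vf 4) := by
  simp only [List.filter_cons, List.filter_nil, pvIdx]
  split_ifs <;> simp_all

lemma pv_filter_const (l : List Int) (b : Bool) : l.filter (fun _ => b) = if b then l else [] := by
  cases b <;> simp

lemma pvIdx_length (k a0 a1 a2 a3 a4 : String) :
    (pvIdx k a0 a1 a2 a3 a4).length = List.count k [a0,a1,a2,a3,a4] := by
  have e0 : (a0 == k) = (k == a0) := BEq.comm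
  have e1 : (a1 == k) = (k == a1) := BEq.comm
  have e2 : (a2 == k) = (k == a2) := BEq.comm
  have e3 : (a3 == k) = (k == a3) := BEq.comm
  have e4 : (a4 == k) = (k == a4) := BEq.comm
  simp only [pvIdx, List.length_append, apply_ite (List.length (α := Int)), List.length_cons,
    List.length_nil, List.count_cons, List.count_nil, e0, e1, e2, e3, e4]
  split_ifs <;> omega

lemma chunkB_eq (k a0 a1 a2 a3 a4 : String) :
    (pvIdx k a0 a1 a2 a3 a4).filter (fun _ => decide ((pvIdx k a0 a1 a2 a3 a4).length < 2))
    = if ((List.count k [a0,a1,a2,a3,a4] : Nat) : Int) < 2 then pvIdx k a0 a1 a2 a3 a4 else [] := by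
  rw [pv_filter_const, pvIdx_length]
  by_cases h : List.count k [a0,a1,a2,a3,a4] < 2
  · rw [if_pos (by simpa using h), if_pos (by exact_mod_cast h)]
  · rw [if_neg (by simpa using h), if_neg (by exact_mod_cast h)]

-- ===== VERDICT (by name: the statement is the Claim_ definition above) =====
theorem execute_number_spec : Claim_equal_execute_number := by
  intro cl m _hdom hpre
  obtain ⟨hlen, hmem⟩ := hpre
  match cl, hlen, hmem with
  | c0 :: c1 :: c2 :: c3 :: c4 :: rest, _, hmem =>
    have hg0 : PySem.List.pyGetD (c0 :: c1 :: c2 :: c3 :: c4 :: rest) (0:Int) [] = c0 := by rw [PySem.List.pyGetD_ofNat']; rfl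
    have hg1 : PySem.List.pyGetD (c0 :: c1 :: c2 :: c3 :: c4 :: rest) (1:Int) [] = c1 := by rw [PySem.List.pyGetD_ofNat']; rfl
    have hg2 : PySem.List.pyGetD (c0 :: c1 :: c2 :: c3 :: c4 :: rest) (2:Int) [] = c2 := by rw [PySem.List.pyGetD_ofNat']; rfl
    have hg3 : PySem.List.pyGetD (c0 :: c1 :: c2 :: c3 :: c4 :: rest) (3:Int) [] = c3 := by rw [PySem.List.pyGetD_ofNat']; rfl
    have hg4 : PySem.List.pyGetD (c0 :: c1 :: c2 :: c3 :: c4 :: rest) (4:Int) [] = c4 := by rw [PySem.List.pyGetD_ofNat']; rfl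
    have hv : ∀ c ∈ [c0, c1, c2, c3, c4], PySem.List.pyGetD c 1 "" ∈ pvK14 := by
      intro c hc
      exact (hmem c (by simpa [List.take] using hc)).2
    have hv0 := hv c0 (by simp); have hv1 := hv c1 (by simp); have hv2 := hv c2 (by simp)
    have hv3 := hv c3 (by simp); have hv4 := hv c4 (by simp)
    unfold Spec_execute_number
    -- ===== A side: normalize to the 13 per-value chunks =====
    have hcnt : ∀ k : String,
        (List.foldl (fun (d : PySem.Dict String Int) i =>
            d.insert (PySem.List.pyGetD (PySem.List.pyGetD (c0 :: c1 :: c2 :: c3 :: c4 :: rest) i []) 1 "")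
              (d.getD (PySem.List.pyGetD (PySem.List.pyGetD (c0 :: c1 :: c2 :: c3 :: c4 :: rest) i []) 1 "") 0 + 1))
          (PySem.Dict.ofList [("0",0),("1",0),("2",0),("3",0),("4",0),("5",0),("6",0),("7",0),("8",0),("9",0),("X",0),("J",0),("Q",0),("K",0)])
          [0,1,2,3,4]).getD k 0
        = ((List.count k [PySem.List.pyGetD c0 1 "", PySem.List.pyGetD c1 1 "", PySem.List.pyGetD c2 1 "",
            PySem.List.pyGetD c3 1 "", PySem.List.pyGetD c4 1 ""] : Nat) : Int) := by
      intro k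
      rw [← List.foldl_map (f := fun i => PySem.List.pyGetD (PySem.List.pyGetD (c0 :: c1 :: c2 :: c3 :: c4 :: rest) i ([]:List String)) 1 "")
          (g := fun (d : PySem.Dict String Int) v => d.insert v (d.getD v 0 + 1))]
      simp only [List.map_cons, List.map_nil, hg0, hg1, hg2, hg3, hg4]
      rw [PySem.Dict.getD_foldl_insert_add_one, hd0, zero_add]
    simp only [execute_number, (by decide : PySem.List.pyRange 0 5 1 = [0,1,2,3,4])]
    simp only [hcnt]
    simp only [List.foldl_cons, List.foldl_nil, hg0, hg1, hg2, hg3, hg4]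
    simp only [inner5]
    simp only [ite_append_acc]
    rw [PySem.List.foldl_append_eq_flatMap]
    simp only [(by decide : PySem.List.pyRange 1 14 1 = [(1:Int),2,3,4,5,6,7,8,9,10,11,12,13]),
      List.flatMap_cons, List.flatMap_nil, List.nil_append, List.append_nil]
    simp only [(by decide : (PySem.Dict.ofList [((0:Int),"0"),(1,"1"),(2,"2"),(3,"3"),(4,"4"),(5,"5"),(6,"6"),(7,"7"),(8,"8"),(9,"9"),(10,"X"),(11,"J"),(12,"Q"),(13,"K")]).getD 1 "" = "1"),
      (by decide : (PySem.Dict.ofList [((0:Int),"0"),(1,"1"),(2,"2"),(3,"3"),(4,"4"),(5,"5"),(6,"6"),(7,"7"),(8,"8"),(9,"9"),(10,"X"),(11,"J"),(12,"Q"),(13,"K")]).getD 2 "" = "2"),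
      (by decide : (PySem.Dict.ofList [((0:Int),"0"),(1,"1"),(2,"2"),(3,"3"),(4,"4"),(5,"5"),(6,"6"),(7,"7"),(8,"8"),(9,"9"),(10,"X"),(11,"J"),(12,"Q"),(13,"K")]).getD 3 "" = "3"),
      (by decide : (PySem.Dict.ofList [((0:Int),"0"),(1,"1"),(2,"2"),(3,"3"),(4,"4"),(5,"5"),(6,"6"),(7,"7"),(8,"8"),(9,"9"),(10,"X"),(11,"J"),(12,"Q"),(13,"K")]).getD 4 "" = "4"),
      (by decide : (PySem.Dict.ofList [((0:Int),"0"),(1,"1"),(2,"2"),(3,"3"),(4,"4"),(5,"5"),(6,"6"),(7,"7"),(8,"8"),(9,"9"),(10,"X"),(11,"J"),(12,"Q"),(13,"K")]).getD 5 "" = "5"),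
      (by decide : (PySem.Dict.ofList [((0:Int),"0"),(1,"1"),(2,"2"),(3,"3"),(4,"4"),(5,"5"),(6,"6"),(7,"7"),(8,"8"),(9,"9"),(10,"X"),(11,"J"),(12,"Q"),(13,"K")]).getD 6 "" = "6"),
      (by decide : (PySem.Dict.ofList [((0:Int),"0"),(1,"1"),(2,"2"),(3,"3"),(4,"4"),(5,"5"),(6,"6"),(7,"7"),(8,"8"),(9,"9"),(10,"X"),(11,"J"),(12,"Q"),(13,"K")]).getD 7 "" = "7"),
      (by decide : (PySem.Dict.ofList [((0:Int),"0"),(1,"1"),(2,"2"),(3,"3"),(4,"4"),(5,"5"),(6,"6"),(7,"7"),(8,"8"),(9,"9"),(10,"X"),(11,"J"),(12,"Q"),(13,"K")]).getD 8 "" = "8"),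
      (by decide : (PySem.Dict.ofList [((0:Int),"0"),(1,"1"),(2,"2"),(3,"3"),(4,"4"),(5,"5"),(6,"6"),(7,"7"),(8,"8"),(9,"9"),(10,"X"),(11,"J"),(12,"Q"),(13,"K")]).getD 9 "" = "9"),
      (by decide : (PySem.Dict.ofList [((0:Int),"0"),(1,"1"),(2,"2"),(3,"3"),(4,"4"),(5,"5"),(6,"6"),(7,"7"),(8,"8"),(9,"9"),(10,"X"),(11,"J"),(12,"Q"),(13,"K")]).getD 10 "" = "X"),
      (by decide : (PySem.Dict.ofList [((0:Int),"0"),(1,"1"),(2,"2"),(3,"3"),(4,"4"),(5,"5"),(6,"6"),(7,"7"),(8,"8"),(9,"9"),(10,"X"),(11,"J"),(12,"Q"),(13,"K")]).getD 11 "" = "J"),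
      (by decide : (PySem.Dict.ofList [((0:Int),"0"),(1,"1"),(2,"2"),(3,"3"),(4,"4"),(5,"5"),(6,"6"),(7,"7"),(8,"8"),(9,"9"),(10,"X"),(11,"J"),(12,"Q"),(13,"K")]).getD 12 "" = "Q"),
      (by decide : (PySem.Dict.ofList [((0:Int),"0"),(1,"1"),(2,"2"),(3,"3"),(4,"4"),(5,"5"),(6,"6"),(7,"7"),(8,"8"),(9,"9"),(10,"X"),(11,"J"),(12,"Q"),(13,"K")]).getD 13 "" = "K")]
    -- ===== B side: normalize to the same 13 chunks =====
    simp only [execute_number_alt, (by decide : PySem.List.pyRange 0 5 1 = [0,1,2,3,4])]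
    have hctn : ∀ j ∈ ([0,1,2,3,4] : List Int),
        (fun j => PySem.List.pyGetD (PySem.List.pyGetD (c0 :: c1 :: c2 :: c3 :: c4 :: rest) j []) 1 "") j = "0" ∨
        ((["1","2","3","4","5","6","7","8","9","X","J","Q","K"] : List String).foldl
          (fun d v => d.insert v ([] : List Int)) PySem.Dict.empty).contains
          ((fun j => PySem.List.pyGetD (PySem.List.pyGetD (c0 :: c1 :: c2 :: c3 :: c4 :: rest) j []) 1 "") j) = true := by
      have hK : ∀ v ∈ pvK14, v = "0" ∨
          ((["1","2","3","4","5","6","7","8","9","X","J","Q","K"] : List String).foldl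
            (fun d v => d.insert v ([] : List Int)) PySem.Dict.empty).contains v = true := by decide
      intro j hj
      fin_cases hj
      · simpa only [hg0] using hK _ hv0
      · simpa only [hg1] using hK _ hv1
      · simpa only [hg2] using hK _ hv2
      · simpa only [hg3] using hK _ hv3
      · simpa only [hg4] using hK _ hv4
    have hkeys := gk_keys (fun j => PySem.List.pyGetD (PySem.List.pyGetD (c0 :: c1 :: c2 :: c3 :: c4 :: rest) j []) 1 "")
      [0,1,2,3,4]
      ((["1","2","3","4","5","6","7","8","9","X","J","Q","K"] : List String).foldl
        (fun d v => d.insert v ([] : List Int)) PySem.Dict.empty) hctn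
    have hkeys13 : (List.foldl (fun (d : PySem.Dict String (List Int)) j =>
        if (PySem.List.pyGetD (PySem.List.pyGetD (c0 :: c1 :: c2 :: c3 :: c4 :: rest) j []) 1 "" != "0") = true
        then d.modify (PySem.List.pyGetD (PySem.List.pyGetD (c0 :: c1 :: c2 :: c3 :: c4 :: rest) j []) 1 "") [] (fun t => t ++ [j]) else d)
        ((["1","2","3","4","5","6","7","8","9","X","J","Q","K"] : List String).foldl
          (fun d v => d.insert v ([] : List Int)) PySem.Dict.empty) [0,1,2,3,4]).keys
        = ["1","2","3","4","5","6","7","8","9","X","J","Q","K"] :=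
      hkeys.trans (by decide)
    rw [PySem.Dict.values_eq_map_keys _ (by rw [hkeys13]; decide) ([] : List Int)]
    rw [hkeys13]
    have hG0getD : ∀ k ∈ (["1","2","3","4","5","6","7","8","9","X","J","Q","K"] : List String),
        ((["1","2","3","4","5","6","7","8","9","X","J","Q","K"] : List String).foldl
          (fun d v => d.insert v ([] : List Int)) PySem.Dict.empty).getD k [] = [] := by decide
    have hmap : (["1","2","3","4","5","6","7","8","9","X","J","Q","K"] : List String).map
        (fun k => (List.foldl (fun (d : PySem.Dict String (List Int)) j =>
          if (PySem.List.pyGetD (PySem.List.pyGetD (c0 :: c1 :: c2 :: c3 :: c4 :: rest) j []) 1 "" != "0") = true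
          then d.modify (PySem.List.pyGetD (PySem.List.pyGetD (c0 :: c1 :: c2 :: c3 :: c4 :: rest) j []) 1 "") [] (fun t => t ++ [j]) else d)
          ((["1","2","3","4","5","6","7","8","9","X","J","Q","K"] : List String).foldl
            (fun d v => d.insert v ([] : List Int)) PySem.Dict.empty) [0,1,2,3,4]).getD k [])
        = (["1","2","3","4","5","6","7","8","9","X","J","Q","K"] : List String).map
        (fun k => pvIdx k (PySem.List.pyGetD c0 1 "") (PySem.List.pyGetD c1 1 "") (PySem.List.pyGetD c2 1 "")
          (PySem.List.pyGetD c3 1 "") (PySem.List.pyGetD c4 1 "")) := by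
      refine List.map_congr_left ?_
      intro k hk
      have hk0 : k ≠ "0" := by
        rintro rfl
        revert hk
        decide
      rw [gk_getD (fun j => PySem.List.pyGetD (PySem.List.pyGetD (c0 :: c1 :: c2 :: c3 :: c4 :: rest) j []) 1 "")
          [0,1,2,3,4] _ k hk0]
      rw [hG0getD k hk, List.nil_append]
      rw [idx5 (fun j => PySem.List.pyGetD (PySem.List.pyGetD (c0 :: c1 :: c2 :: c3 :: c4 :: rest) j []) 1 "") k]
      simp only [hg0, hg1, hg2, hg3, hg4]
    rw [hmap]
    simp only [List.map_cons, List.map_nil, List.flatMap_cons, List.flatMap_nil, List.append_nil]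
    simp only [chunkB_eq]
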